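-- pv_equiv track=rewrite | github.com/neeamh/2048-Game | 2048 low level/logic.py | any_moves_left
-- ===== SOURCE A (Python) =====
-- def transpose(grid):
--     return [list(row) for row in zip(*grid)]
--
-- def any_moves_left(grid):
--     # Check for any zeros in the grid (empty spaces)
--     if any(0 in row for row in grid):
--         return True
--
--     # Check for possible merges horizontally
--     for row in grid:
--         for i in range(3):
--             if row[i] == row[i + 1]:
--                 return True
--
--     # Check for possible merges vertically
--     transposed_grid = transpose(grid)
--     for row in transposed_grid:
--         for i in range(3):
--             if row[i] == row[i + 1]:
--                 return True
--
--     return False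
-- ===== SOURCE B (Python) =====
-- def any_moves_left(grid):
--     # A move exists iff some cell is empty or equals an adjacent cell
--     # (to its right or below it).
--     n = len(grid)
--     return any(
--         v == 0
--         or (j + 1 < len(row) and v == row[j + 1])
--         or (i + 1 < n and j < len(grid[i + 1]) and v == grid[i + 1][j])
--         for i, row in enumerate(grid)
--         for j, v in enumerate(row)
--     )
-- ===== Notes on version B (the rewrite author's own statement) =====
-- stated objective: simpler
-- what changed: B is a single comprehension over all cells checking empty cell / right neighbour / down neighbour, replacing A's three separate scans (zero scan, horizontal merge scan over range(3), transpose helper plus vertical merge scan over range(3)).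
-- intended difference: On zero-free boards of at least 4 rows, each row of length at least 4, whose only equal adjacent pairs lie outside the window A scans (column positions 0..3 of each row and rows 0..3 of the columns zip keeps), A returns False because its hard-coded range(3)/zip window misses those merges, while B returns True, the intended answer. — e.g. on any_moves_left([[1, 2, 3, 4, 5, 5], [6, 7, 8, 9, 10, 11], [12, 13, 14, 15, 16, 17], [18, 19, 20, 21, 22, 23]]): A returns false, B returns true
import Mathlib
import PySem

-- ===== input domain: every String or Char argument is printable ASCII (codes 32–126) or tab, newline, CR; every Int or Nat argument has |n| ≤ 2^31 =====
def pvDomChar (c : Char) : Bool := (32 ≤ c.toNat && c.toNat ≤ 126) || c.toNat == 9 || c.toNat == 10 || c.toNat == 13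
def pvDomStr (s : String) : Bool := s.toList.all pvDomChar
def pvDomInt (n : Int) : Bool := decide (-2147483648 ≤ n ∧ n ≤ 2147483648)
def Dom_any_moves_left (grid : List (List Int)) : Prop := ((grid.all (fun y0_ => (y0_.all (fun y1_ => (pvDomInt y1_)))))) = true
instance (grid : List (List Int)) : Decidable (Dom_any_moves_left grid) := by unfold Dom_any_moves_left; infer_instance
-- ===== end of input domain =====

-- B replaces A's three separate scans (zeros, horizontal merges, transpose + vertical merges)
-- with a single pass over all cells checking empty / right neighbour / down neighbour: simpler.


-- ===== PORT A =====
-- row[i]: exact whenever the index is in range (all accesses inside Pre_ are in range),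
-- where Python returns the element rather than raise
def pvAt (row : List Int) (i : Int) : Int := (PySem.List.pyGet? row i).getD 0

-- zip(*grid): columns up to the shortest row (zip truncation), built column by column
def transposeP (grid : List (List Int)) : List (List Int) :=
  match grid with
  | [] => []
  | r :: rs =>
    (List.range (rs.foldl (fun m row => min m row.length) r.length)).map
      (fun (j : Nat) => (r :: rs).map (fun row => pvAt row (j : Int)))

def any_moves_left (grid : List (List Int)) : Bool :=
  -- any zeros in the grid
  if grid.any (fun row => row.any (· == 0)) then true
  -- horizontal merges: for row in grid: for i in range(3): row[i] == row[i+1]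
  else if grid.any (fun row => (PySem.List.pyRange 0 3 1).any
          (fun i => pvAt row i == pvAt row (i + 1))) then true
  -- vertical merges via transpose
  else if (transposeP grid).any (fun row => (PySem.List.pyRange 0 3 1).any
          (fun i => pvAt row i == pvAt row (i + 1))) then true
  else false

-- ===== PORT B =====
-- grid[i] (in range inside the guards B uses)
def pvRow (grid : List (List Int)) (i : Int) : List Int := (PySem.List.pyGet? grid i).getD []

def any_moves_left_alt (grid : List (List Int)) : Bool :=
  let n : Int := grid.length
  (PySem.List.enumerate grid).any fun p =>
    (PySem.List.enumerate p.2).any fun q =>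
      q.2 == 0
      || (decide (q.1 + 1 < (p.2.length : Int)) && (q.2 == pvAt p.2 (q.1 + 1)))
      || (decide (p.1 + 1 < n) && decide (q.1 < ((pvRow grid (p.1 + 1)).length : Int))
            && (q.2 == pvAt (pvRow grid (p.1 + 1)) q.1))

-- ===== PRECONDITION & SPEC =====
-- Helpers for Pre_/D_: total cell access, the minimum row length (zip's truncation bound),
-- and three input predicates: ZP (some empty cell), WP (an equal adjacent pair inside the
-- window A scans: column positions 0..3 of a row, or rows 0..3 of a column zip keeps),
-- PP (an equal adjacent pair anywhere on the board).
def rowN (grid : List (List Int)) (iN : Nat) : List Int := grid.getD iN []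
def cellN (grid : List (List Int)) (iN jN : Nat) : Int := (grid.getD iN []).getD jN 0

def minLenN (grid : List (List Int)) : Nat :=
  ((grid.map List.length).min?).getD 0

def ZP (grid : List (List Int)) : Prop := ∃ row ∈ grid, (0 : Int) ∈ row

-- Pre_ holds exactly on the inputs where A returns normally (checked against A's scan order):
-- a grid containing a zero, the empty grid, a grid of at least 4 rows each of length at least 4,
-- a horizontal adjacent pair among the first three column positions of a row all of whose
-- predecessor rows have length at least 4, or (all rows of length at least 4) a vertical adjacent
-- pair at the top of the first column. On every other input A raises IndexError.
def Pre_any_moves_left (grid : List (List Int)) : Prop :=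
  ZP grid ∨ grid = [] ∨
    (4 ≤ grid.length ∧ ∀ row ∈ grid, 4 ≤ row.length) ∨
    (∃ iN < grid.length, (∀ k < iN, 4 ≤ (rowN grid k).length) ∧
      ∃ jN < 3, jN + 1 < (rowN grid iN).length ∧ cellN grid iN jN = cellN grid iN (jN + 1)) ∨
    ((∀ row ∈ grid, 4 ≤ row.length) ∧ 0 < minLenN grid ∧
      ∃ kN < 3, kN + 1 < grid.length ∧ cellN grid kN 0 = cellN grid (kN + 1) 0)
instance (grid : List (List Int)) : Decidable (Pre_any_moves_left grid) := by
  unfold Pre_any_moves_left ZP; infer_instance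

def pvWitness_any_moves_left : List (List Int) :=
  [[2, 4, 2, 4], [4, 2, 4, 2], [2, 4, 2, 4], [4, 2, 4, 2]]

-- On zero-free boards of at least 4 rows, each row of length at least 4, whose only equal
-- adjacent pairs lie outside the window A scans (A checks only column positions 0..3 of each
-- row and rows 0..3 of the columns zip keeps), A returns False — its hard-coded range(3)/zip
-- window misses available merges — while B returns True, the intended answer.
-- an equal adjacent pair among the first k adjacent pairs of a row
def winD (l : List Int) (k : Nat) : Prop := ∃ p ∈ (l.zip l.tail).take k, p.1 = p.2

def D_any_moves_left (grid : List (List Int)) : Prop :=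
  0 ∉ grid.flatten ∧
  ¬ ((∃ r ∈ grid, winD r 3) ∨ ∃ c ∈ transposeP grid, winD c 3) ∧
  ((∃ r ∈ grid, winD r r.length) ∨
    ∃ q ∈ grid.zip grid.tail, ∃ p ∈ q.1.zip q.2, p.1 = p.2)
instance (grid : List (List Int)) : Decidable (D_any_moves_left grid) := by
  unfold D_any_moves_left winD; infer_instance

def Spec_any_moves_left (grid : List (List Int)) (out : Bool) : Prop :=
  ¬ D_any_moves_left grid → out = any_moves_left_alt grid
instance (grid : List (List Int)) (out : Bool) : Decidable (Spec_any_moves_left grid out) := by unfold Spec_any_moves_left; infer_instance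

def pvDiffWitness_any_moves_left : List (List Int) :=
  [[1, 2, 3, 4, 5, 5], [6, 7, 8, 9, 10, 11], [12, 13, 14, 15, 16, 17], [18, 19, 20, 21, 22, 23]]
def pvDiffWitnessOut_any_moves_left : Bool × Bool := (false, true)

-- ===== CLAIM (what is proved, stated in full; the proofs are below) =====
def Claim_unchanged_any_moves_left : Prop := ∀ (grid : List (List Int)), Dom_any_moves_left grid → Pre_any_moves_left grid → Spec_any_moves_left grid (any_moves_left grid)
def Claim_changed_any_moves_left : Prop := Dom_any_moves_left (pvDiffWitness_any_moves_left) ∧ Pre_any_moves_left (pvDiffWitness_any_moves_left) ∧ D_any_moves_left (pvDiffWitness_any_moves_left) ∧ any_moves_left (pvDiffWitness_any_moves_left) = pvDiffWitnessOut_any_moves_left.1 ∧ any_moves_left_alt (pvDiffWitness_any_moves_left) = pvDiffWitnessOut_any_moves_left.2 ∧ pvDiffWitnessOut_any_moves_left.1 ≠ pvDiffWitnessOut_any_moves_left.2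
def Claim_exact_any_moves_left : Prop := ∀ (grid : List (List Int)), Dom_any_moves_left grid → Pre_any_moves_left grid → D_any_moves_left grid → any_moves_left grid ≠ any_moves_left_alt grid

-- ===== LEMMAS AND PROOFS =====

def WP (grid : List (List Int)) : Prop :=
  (∃ iN < grid.length, ∃ jN < 3, jN + 1 < (rowN grid iN).length ∧
      cellN grid iN jN = cellN grid iN (jN + 1)) ∨
  (∃ iN < 3, iN + 1 < grid.length ∧ ∃ jN < minLenN grid,
      cellN grid iN jN = cellN grid (iN + 1) jN)

def PP (grid : List (List Int)) : Prop :=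
  ∃ iN < grid.length, ∃ jN < (rowN grid iN).length,
    ((jN + 1 < (rowN grid iN).length ∧ cellN grid iN jN = cellN grid iN (jN + 1)) ∨
     (iN + 1 < grid.length ∧ jN < (rowN grid (iN + 1)).length ∧
        cellN grid iN jN = cellN grid (iN + 1) jN))

-- pvAt / pvRow at an in-range nonnegative index are plain list indexing
theorem pvAt_eq_getElem (row : List Int) (i : Int) (h0 : 0 ≤ i) (h : i.toNat < row.length) :
    pvAt row i = row[i.toNat] := by
  have hi : i < (row.length : Int) := by omega
  simp [pvAt, PySem.List.pyGet?, PySem.List.pyIdx?, h0, hi, h]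

theorem pvRow_eq_getElem (grid : List (List Int)) (i : Int) (h0 : 0 ≤ i) (h : i.toNat < grid.length) :
    pvRow grid i = grid[i.toNat] := by
  have hi : i < (grid.length : Int) := by omega
  simp [pvRow, PySem.List.pyGet?, PySem.List.pyIdx?, h0, hi, h]

theorem foldl_min_le_init (rs : List (List Int)) (a : Nat) :
    rs.foldl (fun m row => min m row.length) a ≤ a := by
  induction rs generalizing a with
  | nil => simp
  | cons r rs ih => exact le_trans (ih _) (Nat.min_le_left _ _)

theorem foldl_min_le_mem (rs : List (List Int)) (row : List Int) :
    ∀ a : Nat, row ∈ rs → rs.foldl (fun m row => min m row.length) a ≤ row.length := by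
  induction rs with
  | nil => intro a h; cases h
  | cons r rs ih =>
    intro a hm
    rw [List.foldl_cons]
    rcases List.mem_cons.mp hm with h | h
    · subst h; exact le_trans (foldl_min_le_init _ _) (Nat.min_le_right _ _)
    · exact ih _ h

theorem minLen_bridge (r : List Int) (rs : List (List Int)) :
    minLenN (r :: rs) = rs.foldl (fun m row => min m row.length) r.length := by
  unfold minLenN
  rw [List.map_cons, List.min?_cons', List.foldl_map]
  rfl

theorem minLenN_le (grid : List (List Int)) (row : List Int) (hm : row ∈ grid) :
    minLenN grid ≤ row.length := by
  rcases grid with _ | ⟨r, rs⟩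
  · simp at hm
  · rw [minLen_bridge]
    rcases List.mem_cons.mp hm with h | h
    · subst h; exact foldl_min_le_init _ _
    · exact foldl_min_le_mem _ _ _ h

theorem rowN_eq (grid : List (List Int)) (iN : Nat) (hi : iN < grid.length) :
    rowN grid iN = grid[iN] := List.getD_eq_getElem grid [] hi

theorem cellN_eq (grid : List (List Int)) (iN jN : Nat) (hi : iN < grid.length)
    (hj : jN < grid[iN].length) : cellN grid iN jN = grid[iN][jN] := by
  unfold cellN
  rw [List.getD_eq_getElem grid [] hi, List.getD_eq_getElem _ 0 hj]

theorem pvAt_eq_getD (row : List Int) (i : Int) (h0 : 0 ≤ i) (h : i < (row.length : Int)) :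
    pvAt row i = row.getD i.toNat 0 := by
  rw [pvAt_eq_getElem row i h0 (by omega), List.getD_eq_getElem _ 0 (by omega)]

theorem pvRow_eq_rowN (grid : List (List Int)) (i : Int) (h0 : 0 ≤ i)
    (h : i < (grid.length : Int)) : pvRow grid i = rowN grid i.toNat := by
  rw [pvRow_eq_getElem grid i h0 (by omega), rowN_eq grid i.toNat (by omega)]

-- membership in (l.zip l.tail).take k is an adjacent pair at an index < k
theorem zipTail_take_mem {α : Type} (l : List α) (k : Nat) (p : α × α) :
    p ∈ (l.zip l.tail).take k ↔
      ∃ i, i < k ∧ ∃ h : i + 1 < l.length, p = (l[i]'(Nat.lt_of_succ_lt h), l[i + 1]'h) := by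
  have hzl : (l.zip l.tail).length = min l.length l.tail.length := List.length_zip
  have htl : l.tail.length = l.length - 1 := List.length_tail
  constructor
  · intro hp
    obtain ⟨i, hi, hval⟩ := List.mem_take_iff_getElem.mp hp
    have h1 : i + 1 < l.length := by omega
    refine ⟨i, by omega, h1, ?_⟩
    rw [← hval, List.getElem_zip, List.getElem_tail]
  · rintro ⟨i, hik, h1, rfl⟩
    apply List.mem_take_iff_getElem.mpr
    refine ⟨i, by omega, ?_⟩
    rw [List.getElem_zip, List.getElem_tail]

theorem zipTail_mem {α : Type} (l : List α) (p : α × α) :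
    p ∈ l.zip l.tail ↔
      ∃ i, ∃ h : i + 1 < l.length, p = (l[i]'(Nat.lt_of_succ_lt h), l[i + 1]'h) := by
  have h : (l.zip l.tail).take l.length = l.zip l.tail := by
    apply List.take_of_length_le
    rw [List.length_zip, List.length_tail]
    omega
  rw [← h, zipTail_take_mem]
  constructor
  · rintro ⟨i, _, h1, he⟩; exact ⟨i, h1, he⟩
  · rintro ⟨i, h1, he⟩; exact ⟨i, by omega, h1, he⟩

-- r.getD on a row of the grid is cellN
theorem getD_row_cellN (grid : List (List Int)) (i j : Nat) (hi : i < grid.length) :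
    grid[i].getD j 0 = cellN grid i j := by
  unfold cellN
  rw [List.getD_eq_getElem grid [] hi]

theorem row_pair_iff (grid : List (List Int)) (i : Nat) (hi : i < grid.length) :
    winD grid[i] grid[i].length ↔
      ∃ j, j + 1 < (rowN grid i).length ∧ cellN grid i j = cellN grid i (j + 1) := by
  unfold winD
  rw [List.take_of_length_le (by rw [List.length_zip, List.length_tail]; omega)]
  rw [rowN_eq grid i hi]
  constructor
  · rintro ⟨p, hp, he⟩
    obtain ⟨j, h1, rfl⟩ := (zipTail_mem _ _).mp hp
    refine ⟨j, h1, ?_⟩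
    rw [← getD_row_cellN grid i j hi, ← getD_row_cellN grid i (j + 1) hi,
        List.getD_eq_getElem _ 0 (by omega), List.getD_eq_getElem _ 0 h1]
    exact he
  · rintro ⟨j, h1, he⟩
    rw [← getD_row_cellN grid i j hi, ← getD_row_cellN grid i (j + 1) hi,
        List.getD_eq_getElem _ 0 (by omega), List.getD_eq_getElem _ 0 h1] at he
    exact ⟨_, (zipTail_mem _ _).mpr ⟨j, h1, rfl⟩, he⟩

theorem row_win_iff (grid : List (List Int)) (i : Nat) (hi : i < grid.length) :
    winD grid[i] 3 ↔
      ∃ j < 3, j + 1 < (rowN grid i).length ∧ cellN grid i j = cellN grid i (j + 1) := by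
  unfold winD
  rw [rowN_eq grid i hi]
  constructor
  · rintro ⟨p, hp, he⟩
    obtain ⟨j, hj3, h1, rfl⟩ := (zipTail_take_mem _ _ _).mp hp
    refine ⟨j, hj3, h1, ?_⟩
    rw [← getD_row_cellN grid i j hi, ← getD_row_cellN grid i (j + 1) hi,
        List.getD_eq_getElem _ 0 (by omega), List.getD_eq_getElem _ 0 h1]
    exact he
  · rintro ⟨j, hj3, h1, he⟩
    rw [← getD_row_cellN grid i j hi, ← getD_row_cellN grid i (j + 1) hi,
        List.getD_eq_getElem _ 0 (by omega), List.getD_eq_getElem _ 0 h1] at he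
    exact ⟨_, (zipTail_take_mem _ _ _).mpr ⟨j, hj3, h1, rfl⟩, he⟩

-- A as a three-way disjunction
theorem any_moves_left_eq_or (grid : List (List Int)) :
    any_moves_left grid =
      (grid.any (fun row => row.any (· == 0))
        || grid.any (fun row => (PySem.List.pyRange 0 3 1).any
              (fun i => pvAt row i == pvAt row (i + 1)))
        || (transposeP grid).any (fun row => (PySem.List.pyRange 0 3 1).any
              (fun i => pvAt row i == pvAt row (i + 1)))) := by
  unfold any_moves_left
  split_ifs <;> simp_all

-- transposeP on a nonempty grid, column by column
theorem transposeP_cons (g0 : List Int) (rest : List (List Int)) :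
    transposeP (g0 :: rest) =
      (List.range (minLenN (g0 :: rest))).map
        (fun (j : Nat) => (g0 :: rest).map (fun row => pvAt row (j : Int))) := by
  rw [minLen_bridge]; rfl

-- A's zero scan is ZP
theorem A_zero_iff (grid : List (List Int)) :
    (grid.any (fun row => row.any (· == 0))) = true ↔ ZP grid := by
  unfold ZP
  simp only [List.any_eq_true, beq_iff_eq]
  constructor
  · rintro ⟨row, hrow, v, hv, h0⟩; exact ⟨row, hrow, h0 ▸ hv⟩
  · rintro ⟨row, hrow, h0⟩; exact ⟨row, hrow, 0, h0, rfl⟩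

-- B's single pass is: some empty cell, or some equal adjacent pair
theorem B_iff (grid : List (List Int)) :
    any_moves_left_alt grid = true ↔ ZP grid ∨ PP grid := by
  unfold any_moves_left_alt ZP PP
  simp only [List.any_eq_true, Bool.or_eq_true, Bool.and_eq_true, decide_eq_true_eq, beq_iff_eq]
  constructor
  · rintro ⟨p, hp, q, hq, hc⟩
    obtain ⟨k, hk, rfl⟩ := (PySem.List.mem_enumerate_iff _ _ _).mp hp
    obtain ⟨l, hl, rfl⟩ := (PySem.List.mem_enumerate_iff _ _ _).mp hq
    dsimp only at hc
    simp only [zero_add] at hc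
    have hrowk : rowN grid k = grid[k] := rowN_eq grid k hk
    have hcellkl : cellN grid k l = grid[k][l] := cellN_eq grid k l hk hl
    have hl2 : l < grid[k].length := hl
    rcases hc with (h0 | ⟨hjl, hC⟩) | ⟨⟨hin, hjm⟩, hC⟩
    · exact Or.inl ⟨grid[k], List.getElem_mem _, h0 ▸ List.getElem_mem _⟩
    · have hjl' : ((l : Int)) + 1 < ((grid[k].length : Nat) : Int) := hjl
      refine Or.inr ⟨k, hk, l, by rw [hrowk]; omega, Or.inl ⟨by rw [hrowk]; omega, ?_⟩⟩
      rw [pvAt_eq_getD _ _ (by omega) hjl'] at hC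
      have e : ((l : Int) + 1).toNat = l + 1 := by omega
      rw [e] at hC
      rw [hcellkl]
      unfold cellN
      rw [List.getD_eq_getElem grid [] hk]
      exact hC
    · have hin' : ((k : Int)) + 1 < ((grid.length : Nat) : Int) := hin
      have hjm' : ((l : Int)) < (((pvRow grid ((k : Int) + 1)).length : Nat) : Int) := hjm
      have hl' : l < grid[k].length := hl
      rw [pvRow_eq_rowN grid ((k : Int) + 1) (by omega) (by omega)] at hjm' hC
      have e : ((k : Int) + 1).toNat = k + 1 := by omega
      rw [e] at hjm' hC
      refine Or.inr ⟨k, hk, l, by rw [hrowk]; omega, Or.inr ⟨by omega, by omega, ?_⟩⟩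
      rw [pvAt_eq_getD _ _ (by omega) (by omega)] at hC
      have el : ((l : Int)).toNat = l := by omega
      rw [el] at hC
      rw [hcellkl]
      unfold cellN
      unfold rowN at hC
      exact hC
  · intro h
    have hmem : ∀ kN lN : Nat, (hk : kN < grid.length) → (hl : lN < grid[kN].length) →
        ((kN : Int), grid[kN]) ∈ PySem.List.enumerate grid 0 ∧
        ((lN : Int), grid[kN][lN]) ∈ PySem.List.enumerate grid[kN] 0 := by
      intro kN lN hk hl
      exact ⟨(PySem.List.mem_enumerate_iff _ _ _).mpr ⟨kN, hk, by simp⟩,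
             (PySem.List.mem_enumerate_iff _ _ _).mpr ⟨lN, hl, by simp⟩⟩
    rcases h with ⟨row, hrow, h0⟩ | ⟨kN, hk, lN, hl, hc⟩
    · obtain ⟨kN, hk, rfl⟩ := List.mem_iff_getElem.mp hrow
      obtain ⟨lN, hl, hv⟩ := List.mem_iff_getElem.mp h0
      obtain ⟨h1, h2⟩ := hmem kN lN hk hl
      exact ⟨_, h1, _, h2, Or.inl (Or.inl hv)⟩
    · rw [rowN_eq grid kN hk] at hl
      obtain ⟨h1, h2⟩ := hmem kN lN hk hl
      have hcellkl : cellN grid kN lN = grid[kN][lN] := cellN_eq grid kN lN hk hl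
      refine ⟨_, h1, _, h2, ?_⟩
      rcases hc with ⟨hjl, hc⟩ | ⟨hin, hjm, hc⟩
      · rw [rowN_eq grid kN hk] at hjl
        refine Or.inl (Or.inr ⟨by dsimp only; omega, ?_⟩)
        show grid[kN][lN] = pvAt grid[kN] ((lN : Int) + 1)
        rw [pvAt_eq_getD _ _ (by omega) (by omega)]
        have e : ((lN : Int) + 1).toNat = lN + 1 := by omega
        rw [e]
        rw [hcellkl] at hc
        unfold cellN at hc
        rw [List.getD_eq_getElem grid [] hk] at hc
        exact hc
      · rw [rowN_eq grid (kN + 1) hin] at hjm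
        refine Or.inr ⟨⟨by dsimp only; omega, ?_⟩, ?_⟩
        · show ((lN : Int)) < ((pvRow grid (((kN : Int)) + 1)).length : Int)
          rw [pvRow_eq_rowN grid ((kN : Int) + 1) (by omega) (by omega)]
          have e : ((kN : Int) + 1).toNat = kN + 1 := by omega
          rw [e, rowN_eq grid (kN + 1) hin]
          omega
        · show grid[kN][lN] = pvAt (pvRow grid (((kN : Int)) + 1)) ((lN : Int))
          rw [pvRow_eq_rowN grid ((kN : Int) + 1) (by omega) (by omega)]
          have e : ((kN : Int) + 1).toNat = kN + 1 := by omega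
          rw [e]
          rw [pvAt_eq_getD _ _ (by omega) (by rw [rowN_eq grid (kN + 1) hin]; omega)]
          have el : ((lN : Int)).toNat = lN := by omega
          rw [el]
          rw [hcellkl] at hc
          unfold rowN
          unfold cellN at hc
          exact hc

-- a window pair is in particular a pair somewhere on the board
theorem WP_imp_PP (grid : List (List Int)) (h : WP grid) : PP grid := by
  unfold WP PP at *
  rcases h with ⟨iN, hi, jN, hj3, hjl, hc⟩ | ⟨iN, hi3, hin, jN, hjm, hc⟩
  · exact ⟨iN, hi, jN, by omega, Or.inl ⟨hjl, hc⟩⟩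
  · have hi : iN < grid.length := by omega
    have h1 : jN < (rowN grid iN).length := by
      rw [rowN_eq grid iN hi]
      exact lt_of_lt_of_le hjm (minLenN_le grid _ (List.getElem_mem _))
    have h2 : jN < (rowN grid (iN + 1)).length := by
      rw [rowN_eq grid (iN + 1) hin]
      exact lt_of_lt_of_le hjm (minLenN_le grid _ (List.getElem_mem _))
    exact ⟨iN, hi, jN, h1, Or.inr ⟨hin, h2, hc⟩⟩

-- A's horizontal scan, on a board all of whose rows have length ≥ 4, is the horizontal window
theorem A_horiz_iff (grid : List (List Int)) (hr : ∀ row ∈ grid, 4 ≤ row.length) :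
    (grid.any (fun row => (PySem.List.pyRange 0 3 1).any
        (fun i => pvAt row i == pvAt row (i + 1)))) = true ↔
      ∃ iN < grid.length, ∃ jN < 3, jN + 1 < (rowN grid iN).length ∧
        cellN grid iN jN = cellN grid iN (jN + 1) := by
  simp only [List.any_eq_true, PySem.List.mem_pyRange_one, beq_iff_eq]
  constructor
  · rintro ⟨row, hrow, i, ⟨h0i, hi3⟩, heq⟩
    obtain ⟨iN, hi, rfl⟩ := List.mem_iff_getElem.mp hrow
    have hlen : 4 ≤ grid[iN].length := hr _ (List.getElem_mem _)
    rw [pvAt_eq_getD _ i h0i (by omega), pvAt_eq_getD _ (i + 1) (by omega) (by omega)] at heq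
    have e : (i + 1).toNat = i.toNat + 1 := by omega
    rw [e] at heq
    refine ⟨iN, hi, i.toNat, by omega, ?_, ?_⟩
    · rw [rowN_eq grid iN hi]; omega
    · unfold cellN
      rw [List.getD_eq_getElem grid [] hi]
      exact heq
  · rintro ⟨iN, hi, jN, hj3, hjl, heq⟩
    rw [rowN_eq grid iN hi] at hjl
    refine ⟨grid[iN], List.getElem_mem _, (jN : Int), ⟨by omega, by omega⟩, ?_⟩
    rw [pvAt_eq_getD _ _ (by omega) (by omega),
        pvAt_eq_getD _ _ (by omega) (by omega)]
    have e1 : ((jN : Int)).toNat = jN := by omega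
    have e2 : ((jN : Int) + 1).toNat = jN + 1 := by omega
    rw [e1, e2]
    unfold cellN at heq
    rw [List.getD_eq_getElem grid [] hi] at heq
    exact heq

-- a column pair inside zip's window makes A's vertical scan fire (any nonempty grid)
theorem hcol_eq (grid : List (List Int)) (jN : Nat) (hjm : jN < minLenN grid)
    (kN : Nat) (hk : kN < grid.length) :
    (grid.map (fun row => pvAt row (jN : Int))).getD kN 0 = cellN grid kN jN := by
  have hjk : jN < grid[kN].length :=
    lt_of_lt_of_le hjm (minLenN_le grid _ (List.getElem_mem _))
  rw [List.getD_eq_getElem _ 0 (by simpa using hk), List.getElem_map,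
      cellN_eq grid kN jN hk hjk,
      pvAt_eq_getD _ (jN : Int) (by omega) (by omega)]
  simp only [Int.toNat_natCast]
  rw [List.getD_eq_getElem _ 0 hjk]

theorem A_vert_of_pair (grid : List (List Int)) (hne : grid ≠ [])
    (iN : Nat) (hi3 : iN < 3) (hin : iN + 1 < grid.length)
    (jN : Nat) (hjm : jN < minLenN grid)
    (heq : cellN grid iN jN = cellN grid (iN + 1) jN) :
    ((transposeP grid).any (fun row => (PySem.List.pyRange 0 3 1).any
        (fun i => pvAt row i == pvAt row (i + 1)))) = true := by
  obtain ⟨g0, rest, hgr⟩ := List.exists_cons_of_ne_nil hne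
  simp only [List.any_eq_true, PySem.List.mem_pyRange_one, beq_iff_eq]
  refine ⟨grid.map (fun row => pvAt row (jN : Int)), ?_, (iN : Int), ⟨by omega, by omega⟩, ?_⟩
  · rw [hgr, transposeP_cons, ← hgr]
    refine List.mem_map.mpr ⟨jN, List.mem_range.mpr hjm, rfl⟩
  · have hlc : (grid.map (fun row => pvAt row (jN : Int))).length = grid.length := by simp
    rw [pvAt_eq_getD _ (iN : Int) (by omega) (by omega),
        pvAt_eq_getD _ ((iN : Int) + 1) (by omega) (by omega)]
    have e1 : ((iN : Int)).toNat = iN := by omega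
    have e2 : ((iN : Int) + 1).toNat = iN + 1 := by omega
    rw [e1, e2, hcol_eq grid jN hjm iN (by omega), hcol_eq grid jN hjm (iN + 1) hin]
    exact heq

-- A's vertical scan (over the zip transpose), on a board of ≥ 4 rows, is the vertical window
theorem A_vert_iff (grid : List (List Int)) (hn : 4 ≤ grid.length) :
    ((transposeP grid).any (fun row => (PySem.List.pyRange 0 3 1).any
        (fun i => pvAt row i == pvAt row (i + 1)))) = true ↔
      ∃ iN < 3, iN + 1 < grid.length ∧ ∃ jN < minLenN grid,
        cellN grid iN jN = cellN grid (iN + 1) jN := by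
  have hne : grid ≠ [] := by intro h; rw [h] at hn; simp at hn
  obtain ⟨g0, rest, hgr⟩ := List.exists_cons_of_ne_nil hne
  constructor
  swap
  · rintro ⟨iN, hi3, hin, jN, hjm, heq⟩
    exact A_vert_of_pair grid hne iN hi3 hin jN hjm heq
  simp only [List.any_eq_true, PySem.List.mem_pyRange_one, beq_iff_eq]
  · rintro ⟨col, hcolm, i, ⟨h0i, hi3⟩, heq⟩
    rw [hgr, transposeP_cons, ← hgr] at hcolm
    obtain ⟨jN, hjm, hcval⟩ := List.mem_map.mp hcolm
    rw [List.mem_range] at hjm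
    have hjm' : jN < minLenN grid := hjm
    have hcl : col.length = grid.length := by rw [← hcval]; simp
    rw [pvAt_eq_getD _ i h0i (by omega), pvAt_eq_getD _ (i + 1) (by omega) (by omega)] at heq
    have e : (i + 1).toNat = i.toNat + 1 := by omega
    rw [e, ← hcval] at heq
    rw [hcol_eq grid jN hjm' i.toNat (by omega), hcol_eq grid jN hjm' (i.toNat + 1) (by omega)] at heq
    exact ⟨i.toNat, by omega, by omega, jN, hjm', heq⟩

-- under ¬ZP plus the 4×≥4 shape, A is exactly the window predicate WP
theorem A_iff_of_shape (grid : List (List Int)) (hn : 4 ≤ grid.length)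
    (hr : ∀ row ∈ grid, 4 ≤ row.length) (hz : ¬ ZP grid) :
    (any_moves_left grid = true ↔ WP grid) := by
  rw [any_moves_left_eq_or]
  simp only [Bool.or_eq_true]
  rw [A_zero_iff, A_horiz_iff grid hr, A_vert_iff grid hn]
  unfold WP
  constructor
  · rintro ((h | h) | h)
    exacts [absurd h hz, Or.inl h, Or.inr h]
  · rintro (h | h)
    exacts [Or.inl (Or.inr h), Or.inr h]

theorem col_getD (grid : List (List Int)) (j : Nat) (hjm : j < minLenN grid)
    (k : Nat) (hk : k < grid.length) :
    (grid.map (fun row => pvAt row (j : Int)))[k]'(by simpa using hk) = cellN grid k j := by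
  rw [← List.getD_eq_getElem _ 0 (by simpa using hk)]
  exact hcol_eq grid j hjm k hk

theorem wv_iff (grid : List (List Int)) :
    (∃ c ∈ transposeP grid, winD c 3) ↔
      (∃ i < 3, i + 1 < grid.length ∧ ∃ j < minLenN grid,
        cellN grid i j = cellN grid (i + 1) j) := by
  unfold winD
  rcases hg : grid with _ | ⟨g0, rest⟩
  · constructor
    · rintro ⟨c, hc, -⟩; simp [transposeP] at hc
    · rintro ⟨i, -, hin, -⟩; simp at hin
  rw [← hg]
  have hgr : grid = g0 :: rest := hg
  constructor
  · rintro ⟨c, hc, p, hpm, hpe⟩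
    rw [hgr, transposeP_cons, ← hgr] at hc
    obtain ⟨j, hjm, rfl⟩ := List.mem_map.mp hc
    rw [List.mem_range] at hjm
    have hjm' : j < minLenN grid := hjm
    obtain ⟨i, hi3, h1, rfl⟩ := (zipTail_take_mem _ _ _).mp hpm
    have hlc : (grid.map (fun row => pvAt row (j : Int))).length = grid.length := by simp
    have h1' : i + 1 < grid.length := by omega
    simp only at hpe
    rw [col_getD grid j hjm' i (by omega), col_getD grid j hjm' (i + 1) h1'] at hpe
    exact ⟨i, hi3, h1', j, hjm', hpe⟩
  · rintro ⟨i, hi3, hin, j, hjm, he⟩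
    refine ⟨grid.map (fun row => pvAt row (j : Int)), ?_, ?_⟩
    · rw [hgr, transposeP_cons, ← hgr]
      exact List.mem_map.mpr ⟨j, List.mem_range.mpr hjm, rfl⟩
    · have hlc : (grid.map (fun row => pvAt row (j : Int))).length = grid.length := by simp
      refine ⟨_, (zipTail_take_mem _ _ _).mpr ⟨i, hi3, by omega, rfl⟩, ?_⟩
      simp only
      rw [col_getD grid j hjm i (by omega), col_getD grid j hjm (i + 1) (by omega)]
      exact he

theorem D_iff (grid : List (List Int)) :
    D_any_moves_left grid ↔ (¬ ZP grid ∧ ¬ WP grid ∧ PP grid) := by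
  unfold D_any_moves_left ZP
  constructor
  · rintro ⟨h2, h3, h4⟩
    refine ⟨fun ⟨r, hr, h0⟩ => h2 (List.mem_flatten.mpr ⟨r, hr, h0⟩), ?_, ?_⟩
    · intro hwp
      apply h3
      rcases hwp with ⟨i, hi, j, hj3, hjl, he⟩ | hv
      · left
        rw [rowN_eq grid i hi] at hjl
        refine ⟨grid[i], List.getElem_mem _, ?_⟩
        exact (row_win_iff grid i hi).mpr ⟨j, hj3, by rw [rowN_eq grid i hi]; omega, he⟩
      · exact Or.inr ((wv_iff grid).mpr hv)
    · unfold PP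
      rcases h4 with ⟨r, hr, hpair⟩ | ⟨q, hq, hpair⟩
      · obtain ⟨i, hi, rfl⟩ := List.mem_iff_getElem.mp hr
        obtain ⟨j, h1, he⟩ := (row_pair_iff grid i hi).mp hpair
        exact ⟨i, hi, j, by omega, Or.inl ⟨h1, he⟩⟩
      · obtain ⟨i, h1, rfl⟩ := (zipTail_mem _ _).mp hq
        obtain ⟨p, hp, he⟩ := hpair
        simp only at hp
        obtain ⟨j, hj, rfl⟩ := List.mem_iff_getElem.mp hp
        rw [List.length_zip] at hj
        rw [List.getElem_zip] at he
        simp only at he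
        have he2 : cellN grid i j = cellN grid (i + 1) j := by
          rw [cellN_eq grid i j (by omega) (by omega), cellN_eq grid (i + 1) j h1 (by omega)]
          exact he
        refine ⟨i, by omega, j, ?_, Or.inr ⟨h1, ?_, he2⟩⟩
        · rw [rowN_eq grid i (by omega)]; omega
        · rw [rowN_eq grid (i + 1) h1]; omega
  · rintro ⟨hz, hw, hp⟩
    refine ⟨fun h0 => hz (by obtain ⟨r, hr, h0'⟩ := List.mem_flatten.mp h0; exact ⟨r, hr, h0'⟩), ?_, ?_⟩
    · rintro (⟨r, hr, hpair⟩ | hv)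
      · apply hw
        obtain ⟨i, hi, rfl⟩ := List.mem_iff_getElem.mp hr
        obtain ⟨j, hj3, hj1, he⟩ := (row_win_iff grid i hi).mp hpair
        exact Or.inl ⟨i, hi, j, hj3, hj1, he⟩
      · exact hw (Or.inr ((wv_iff grid).mp hv))
    · unfold PP at hp
      rcases hp with ⟨i, hi, j, hj, hc⟩
      rcases hc with ⟨hjl, he⟩ | ⟨hin, hjm, he⟩
      · exact Or.inl ⟨grid[i], List.getElem_mem _, (row_pair_iff grid i hi).mpr ⟨j, hjl, he⟩⟩
      · rw [rowN_eq grid i hi] at hj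
        rw [rowN_eq grid (i + 1) hin] at hjm
        refine Or.inr ⟨(grid[i], grid[i + 1]'hin), (zipTail_mem _ _).mpr ⟨i, hin, rfl⟩, ?_⟩
        refine ⟨((grid[i])[j]'hj, (grid[i + 1]'hin)[j]'hjm), ?_, ?_⟩
        · simp only
          rw [List.mem_iff_getElem]
          refine ⟨j, by rw [List.length_zip]; omega, ?_⟩
          rw [List.getElem_zip]
        · simp only
          rw [← List.getD_eq_getElem _ 0 hj, ← List.getD_eq_getElem _ 0 hjm,
              getD_row_cellN grid i j hi, getD_row_cellN grid (i + 1) j hin]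
          exact he

theorem unchanged' (grid : List (List Int)) (hpre : Pre_any_moves_left grid)
    (hnd : ¬ D_any_moves_left grid) : any_moves_left grid = any_moves_left_alt grid := by
  by_cases hz : ZP grid
  · -- both sides are true
    have hA : any_moves_left grid = true := by
      rw [any_moves_left_eq_or]
      simp only [Bool.or_eq_true]
      exact Or.inl (Or.inl ((A_zero_iff grid).mpr hz))
    rw [hA, ((B_iff grid).mpr (Or.inl hz))]
  · rcases hpre with h | hE | ⟨hn, hr⟩ | ⟨iN, hiN, _, jN, hj3, hjl, heq⟩ | ⟨hall, hm0, kN, hk3, hkn, heq⟩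
    · exact absurd h hz
    · subst hE; decide
    · -- shape case: both reduce to window/pair predicates; ¬D_ closes the gap
      rw [Bool.eq_iff_iff, A_iff_of_shape grid hn hr hz, B_iff]
      rw [D_iff] at hnd
      constructor
      · intro hw; exact Or.inr (WP_imp_PP grid hw)
      · rintro (h | hp)
        · exact absurd h hz
        · by_cases hw : WP grid
          · exact hw
          · exact absurd ⟨hz, hw, hp⟩ hnd
    · -- early horizontal pair: both true
      have hA : any_moves_left grid = true := by
        rw [any_moves_left_eq_or]
        simp only [Bool.or_eq_true]
        refine Or.inl (Or.inr ?_)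
        simp only [List.any_eq_true, PySem.List.mem_pyRange_one, beq_iff_eq]
        refine ⟨rowN grid iN, ?_, (jN : Int), ⟨by omega, by omega⟩, ?_⟩
        · rw [rowN_eq grid iN hiN]; exact List.getElem_mem _
        · rw [pvAt_eq_getD _ (jN : Int) (by omega) (by omega),
              pvAt_eq_getD _ ((jN : Int) + 1) (by omega) (by omega)]
          have e1 : ((jN : Int)).toNat = jN := by omega
          have e2 : ((jN : Int) + 1).toNat = jN + 1 := by omega
          rw [e1, e2]
          simpa [cellN, rowN] using heq
      have hB : any_moves_left_alt grid = true :=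
        (B_iff grid).mpr (Or.inr ⟨iN, hiN, jN, by omega, Or.inl ⟨hjl, heq⟩⟩)
      rw [hA, hB]
    · -- early vertical pair at the top of the first column: both true
      have hn0 : 0 < grid.length := by omega
      have hrow0 : ∀ (k : Nat), (hk : k < grid.length) → (0 : Nat) < (rowN grid k).length := by
        intro k hk
        rw [rowN_eq grid k hk]
        have := hall _ (List.getElem_mem hk)
        omega
      have hne : grid ≠ [] := by intro h; rw [h] at hkn; simp at hkn
      have hA : any_moves_left grid = true := by
        rw [any_moves_left_eq_or]
        simp only [Bool.or_eq_true]
        exact Or.inr (A_vert_of_pair grid hne kN hk3 hkn 0 hm0 heq)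
      have hB : any_moves_left_alt grid = true := by
        refine (B_iff grid).mpr (Or.inr ⟨kN, by omega, 0, hrow0 kN (by omega),
          Or.inr ⟨hkn, hrow0 (kN + 1) hkn, heq⟩⟩)
      rw [hA, hB]

-- ===== VERDICT (by name: the statement is the Claim_ definition above) =====
theorem any_moves_left_spec : Claim_unchanged_any_moves_left := by
  intro grid _ hpre hnd
  exact unchanged' grid hpre hnd

theorem any_moves_left_changed : Claim_changed_any_moves_left := by
  unfold Claim_changed_any_moves_left; decide

theorem any_moves_left_tight : Claim_exact_any_moves_left := by
  intro grid _ hpre hd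
  obtain ⟨hz, hw, hp⟩ := (D_iff grid).mp hd
  have hsh : 4 ≤ grid.length ∧ ∀ row ∈ grid, 4 ≤ row.length := by
    rcases hpre with h | hE | hsh | ⟨iN, hiN, hpr, jN, hj3, hjl, heq⟩ | ⟨hall, hm0, kN, hk3, hkn, heq⟩
    · exact absurd h hz
    · subst hE
      unfold PP at hp
      obtain ⟨i, hi, -⟩ := hp
      simp at hi
    · exact hsh
    · exact absurd (Or.inl ⟨iN, hiN, jN, hj3, hjl, heq⟩) hw
    · exact absurd (Or.inr ⟨kN, hk3, hkn, 0, hm0, heq⟩) hw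
  obtain ⟨hn, hr⟩ := hsh
  have hA : any_moves_left grid = false := by
    have := A_iff_of_shape grid hn hr hz
    rcases Bool.eq_false_or_eq_true (any_moves_left grid) with h | h
    · exact absurd (this.mp h) hw
    · exact h
  have hB : any_moves_left_alt grid = true := (B_iff grid).mpr (Or.inr hp)
  rw [hA, hB]; simp
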